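-- pv_equiv track=rewrite | github.com/pythaqua/pacote-desafios-pythonicos | 02_both_ends.py | both_ends
-- ===== SOURCE A (Python) =====
-- def both_ends(s):
--     s_length = len(s)
--     output = []
--     if s_length > 1:
--         counter = 0
--         first_part, last_part = [], []
--         while counter < s_length:
--             if counter < 2:
--                 first_part.append(s[counter])
--             if counter > (s_length - 3):
--                 last_part.append(s[counter])
--             counter += 1
--         output.extend([*first_part, *last_part])
--     return ''.join(output)
-- ===== SOURCE B (Python) =====
-- def both_ends(s):
--     return s[:2] + s[-2:] if len(s) > 1 else ''
-- ===== Notes on version B (the rewrite author's own statement) =====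
-- stated objective: faster
-- what changed: Replaced the index-scanning while loop that builds first/last character lists with direct slicing s[:2] + s[-2:] guarded by len(s) > 1.
import Mathlib
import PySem

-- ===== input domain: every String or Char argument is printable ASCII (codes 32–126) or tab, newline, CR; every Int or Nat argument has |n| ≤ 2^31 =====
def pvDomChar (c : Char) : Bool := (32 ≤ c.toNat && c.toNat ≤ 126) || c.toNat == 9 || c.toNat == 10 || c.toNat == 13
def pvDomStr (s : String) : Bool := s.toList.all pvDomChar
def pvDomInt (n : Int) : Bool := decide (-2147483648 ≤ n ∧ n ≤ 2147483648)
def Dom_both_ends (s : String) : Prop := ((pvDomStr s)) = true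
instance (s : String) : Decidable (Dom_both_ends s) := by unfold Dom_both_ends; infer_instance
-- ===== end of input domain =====

-- B replaces A's index-scanning loop with direct slicing s[:2] + s[-2:] (simpler).

-- ===== PORT A =====
-- A's while loop: counter = 0 .. s_length-1, appending s[counter] to first_part / last_part.
def bothEndsLoop (l : List Char) (m : Nat) : List Char × List Char :=
  (PySem.List.pyRange 0 (m : Int) 1).foldl
    (fun (st : List Char × List Char) (counter : Int) =>
      (if counter < 2 then st.1 ++ [PySem.List.pyGetD l counter ' '] else st.1,
       if counter > (l.length : Int) - 3 then st.2 ++ [PySem.List.pyGetD l counter ' '] else st.2))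
    ([], [])

def both_ends (s : String) : String :=
  let output : List Char :=
    if (PySem.Str.len s) > 1 then
      let fl := bothEndsLoop s.toList s.toList.length
      fl.1 ++ fl.2
    else []
  String.ofList output

-- ===== PORT B =====
def both_ends_alt (s : String) : String :=
  if PySem.Str.len s > 1 then
    String.ofList (PySem.List.slice s.toList none (some 2) ++ PySem.List.slice s.toList (some (-2)) none)
  else ""

-- ===== PRECONDITION & SPEC =====
def Spec_both_ends (s : String) (out : String) : Prop := out = both_ends_alt s
instance (s : String) (out : String) : Decidable (Spec_both_ends s out) := by unfold Spec_both_ends; infer_instance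

-- ===== CLAIM (what is proved, stated in full; the proofs are below) =====
def Claim_equal_both_ends : Prop := ∀ (s : String), Dom_both_ends s → Spec_both_ends s (both_ends s)

-- ===== LEMMAS AND PROOFS =====

-- A's loop over counter = 0..m-1 accumulates (take of first 2, suffix past length-2) of the m-prefix.
lemma both_ends_fold (l : List Char) (h2 : 2 ≤ l.length) (m : Nat) (hm : m ≤ l.length) :
    bothEndsLoop l m = ((l.take m).take 2, (l.take m).drop (l.length - 2)) := by
  unfold bothEndsLoop
  induction m with
  | zero => simp [PySem.List.pyRange]
  | succ m ih =>
    have hm' : m ≤ l.length := Nat.le_of_succ_le hm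
    have hlt : m < l.length := hm
    have hrange : PySem.List.pyRange 0 ((m+1 : Nat) : Int) 1
        = PySem.List.pyRange 0 (m : Int) 1 ++ [(m : Int)] := by
      have := PySem.List.pyRange_one_succ_right (a := 0) (b := (m : Int)) (by positivity)
      push_cast
      push_cast at this
      exact this
    rw [hrange, List.foldl_append, ih hm']
    have hget : PySem.List.pyGetD l (m : Int) ' ' = l[m] :=
      PySem.List.pyGetD_ofNat (xs := l) m ' ' hlt
    have htake : l.take (m+1) = l.take m ++ [l[m]] := by
      rw [List.take_add_one]
      simp [List.getElem?_eq_getElem hlt]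
    simp only [List.foldl_cons, List.foldl_nil, hget, htake]
    have hlen : (l.take m).length = m := List.length_take_of_le hm'
    by_cases hc1 : (m : Int) < 2
    · have hm2 : m < 2 := by exact_mod_cast hc1
      have e1 : (l.take m).take 2 = l.take m := List.take_of_length_le (by rw [hlen]; omega)
      have e2 : (l.take m ++ [l[m]]).take 2 = l.take m ++ [l[m]] :=
        List.take_of_length_le (by simp; omega)
      by_cases hc2 : (m : Int) > (l.length : Int) - 3
      · have hge : l.length - 2 ≤ m := by omega
        have e3 : (l.take m ++ [l[m]]).drop (l.length - 2)
            = (l.take m).drop (l.length - 2) ++ [l[m]] :=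
          List.drop_append_of_le_length (by rw [hlen]; omega)
        simp only [if_pos hc1, if_pos hc2, e1, e2, e3]
      · have hlt2 : m < l.length - 2 := by omega
        have e3 : (l.take m ++ [l[m]]).drop (l.length - 2) = [] :=
          List.drop_eq_nil_of_le (by simp; omega)
        have e4 : (l.take m).drop (l.length - 2) = [] :=
          List.drop_eq_nil_of_le (by rw [hlen]; omega)
        simp only [if_pos hc1, if_neg hc2, e1, e2, e3, e4]
    · have hm2 : ¬ m < 2 := by omega
      have e2 : (l.take m ++ [l[m]]).take 2 = (l.take m).take 2 :=
        List.take_append_of_le_length (by rw [hlen]; omega)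
      by_cases hc2 : (m : Int) > (l.length : Int) - 3
      · have hge : l.length - 2 ≤ m := by omega
        have e3 : (l.take m ++ [l[m]]).drop (l.length - 2)
            = (l.take m).drop (l.length - 2) ++ [l[m]] :=
          List.drop_append_of_le_length (by rw [hlen]; omega)
        simp only [if_neg hc1, if_pos hc2, e2, e3]
      · have hlt2 : m < l.length - 2 := by omega
        have e3 : (l.take m ++ [l[m]]).drop (l.length - 2) = [] :=
          List.drop_eq_nil_of_le (by simp; omega)
        have e4 : (l.take m).drop (l.length - 2) = [] :=
          List.drop_eq_nil_of_le (by rw [hlen]; omega)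
        simp only [if_neg hc1, if_neg hc2, e2, e3, e4]

-- ===== VERDICT (by name: the statement is the Claim_ definition above) =====
theorem both_ends_spec : Claim_equal_both_ends := by
  intro s _
  unfold Spec_both_ends both_ends both_ends_alt
  simp only [PySem.Str.len_eq]
  by_cases h : ((s.toList.length : Int) > 1)
  · have h2 : 2 ≤ s.toList.length := by exact_mod_cast h
    rw [if_pos h, if_pos h, both_ends_fold s.toList h2 s.toList.length le_rfl,
      PySem.List.slice_to s.toList (by norm_num : (0:Int) ≤ 2),
      PySem.List.slice_from_neg_ofNat s.toList 2 (by omega)]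
    simp
    have ht : List.take s.length s.toList = s.toList := List.take_of_length_le (by simp)
    rw [ht]
  · rw [if_neg h, if_neg h]
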